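-- pv_equiv track=rewrite | github.com/blauert/infi-nl-Advent-of-Code | 2020 Bepakt en bezakt/bepakt_en_bezakt.py | kleinste_zak
-- ===== SOURCE A (Python) =====
-- def aantal_pakjes_in_zak(side_length):
--     pakjes_curr = side_length
--     pakjes = 0
--     for i in range(side_length):
--         pakjes += pakjes_curr
--         pakjes_curr += 2
--     middle = side_length * pakjes_curr
--     pakjes *= 2
--     pakjes += middle
--     return pakjes
--
-- def kleinste_zak(goal, step=1):
--     guess = {'low': 0, 'high': float('inf')}
--     # Guess
--     while guess['high'] == float('inf'):
--         curr = guess['low'] + step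
--         aantal_pakjes = aantal_pakjes_in_zak(curr)
--         if aantal_pakjes < goal:
--             guess['low'] = curr
--         elif aantal_pakjes >= goal:
--             guess['high'] = curr
--     # Bisect
--     while guess['high'] > (guess['low'] + 1):
--         half = guess['high'] - (guess['high'] - guess['low']) // 2
--         aantal_pakjes = aantal_pakjes_in_zak(half)
--         if aantal_pakjes < goal:
--             guess['low'] = half
--         elif aantal_pakjes >= goal:
--             guess['high'] = half
--     return guess['high']
-- ===== SOURCE B (Python) =====
-- # B: closed form. smallest s >= 1 with 7*s*s - 2*s >= goal, via an integer
-- # Newton square root of the discriminant -- O(log goal) instead of A's scan+bisect.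
-- def _isqrt(n):
--     # floor integer square root by Newton's method (n >= 2 at every call site)
--     guess = n // 2
--     while True:
--         next_ = (guess + n // guess) // 2
--         if next_ >= guess:
--             return guess
--         guess = next_
--
-- def kleinste_zak(goal, step=1):
--     # a bag of side s holds 7*s*s - 2*s packages; find the least s >= 1 reaching goal
--     if goal <= 5:
--         return 1          # f(1) = 5 already reaches the goal
--     r = _isqrt(1 + 7 * goal)
--     s = (r + 7) // 7      # = ceil((r + 1) / 7), candidate root
--     if 7 * s * s - 2 * s < goal:
--         s += 1
--     return s
-- ===== Notes on version B (the rewrite author's own statement) =====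
-- stated objective: faster
-- what changed: Replaces A's linear stepping plus bisection (each probe re-summing a quadratic-size loop) with the closed-form condition 7s^2-2s >= goal solved by one integer Newton square root and a one-step adjustment.
-- outside the precondition, e.g. on kleinste_zak(5, -1): A returns -3, B returns 1; on kleinste_zak(0, 0): A returns 0, B returns 1
import Mathlib
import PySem

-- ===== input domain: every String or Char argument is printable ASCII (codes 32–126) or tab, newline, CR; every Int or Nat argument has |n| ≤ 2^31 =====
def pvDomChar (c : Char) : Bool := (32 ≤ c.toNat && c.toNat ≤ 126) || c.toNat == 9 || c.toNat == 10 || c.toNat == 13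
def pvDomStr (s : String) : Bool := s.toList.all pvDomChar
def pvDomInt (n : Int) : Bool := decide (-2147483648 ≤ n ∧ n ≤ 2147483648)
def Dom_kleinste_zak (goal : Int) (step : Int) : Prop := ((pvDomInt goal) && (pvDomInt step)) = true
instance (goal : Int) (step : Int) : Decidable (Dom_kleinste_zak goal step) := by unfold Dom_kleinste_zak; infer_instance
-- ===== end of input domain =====

-- B replaces A's step-then-bisect search by the closed-form quadratic solved with an
-- integer Newton square root (measured faster; asymptotic change).

-- ===== PORT A =====
-- pakjes/pakjes_curr accumulator pair folded over range(side_length)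
def aantal_pakjes_in_zak (side_length : Int) : Int :=
  let st := (PySem.List.pyRange 0 side_length 1).foldl
      (fun (st : Int × Int) (_ : Int) => (st.1 + st.2, st.2 + 2)) ((0 : Int), side_length)
  let middle := side_length * st.2
  st.1 * 2 + middle

-- A's first while-loop ('Guess'); the fuel argument is only a totality guard for the
-- while-loop (never exhausted when 1 ≤ step, proven below); state = guess['low'].
def kleinste_zak_guess (goal : Int) (step : Int) : Nat → Int → Int × Int
  | 0, low => (low, low + step)
  | fuel+1, low =>
    let curr := low + step
    if aantal_pakjes_in_zak curr < goal then kleinste_zak_guess goal step fuel curr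
    else (low, curr)

-- A's second while-loop ('Bisect'); state = (guess['low'], guess['high']).
def kleinste_zak_bisect (goal : Int) (low : Int) (high : Int) : Int :=
  if _h : high > low + 1 then
    let half := high - PySem.Int.floordiv (high - low) 2
    if aantal_pakjes_in_zak half < goal then kleinste_zak_bisect goal half high
    else kleinste_zak_bisect goal low half
  else high
termination_by (high - low).toNat
decreasing_by
  · have h2 : PySem.Int.floordiv (high - low) 2 = (high - low) / 2 :=
      PySem.Int.floordiv_eq_ediv_of_pos (by omega)
    simp only [h2]
    omega
  · have h2 : PySem.Int.floordiv (high - low) 2 = (high - low) / 2 :=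
      PySem.Int.floordiv_eq_ediv_of_pos (by omega)
    simp only [h2]
    omega

def kleinste_zak (goal : Int) (step : Int) : Int :=
  let lh := kleinste_zak_guess goal step (goal.toNat + 2) 0
  kleinste_zak_bisect goal lh.1 lh.2

-- ===== PORT B =====
-- Source B's Newton while-loop of _isqrt; Python's // on the nonnegative ints reached here
-- is Nat division, so the loop is ported over Nat (exact for n ≥ 2, the only call sites).
def isqrtLoop (n : Nat) (guess : Nat) : Nat :=
  let next := (guess + n / guess) / 2
  if h : next < guess then isqrtLoop n next else guess
termination_by guess
decreasing_by exact h

-- Source B's _isqrt(n) = isqrtLoop from the initial guess n // 2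
def pyIsqrt (n : Int) : Int :=
  ((isqrtLoop n.toNat (n.toNat / 2) : Nat) : Int)

def kleinste_zak_alt (goal : Int) (step : Int) : Int :=
  if goal ≤ 5 then 1
  else
    let r := pyIsqrt (1 + 7 * goal)
    let s := PySem.Int.floordiv (r + 7) 7
    if 7 * s * s - 2 * s < goal then s + 1 else s

-- ===== PRECONDITION & SPEC =====
-- Pre_ excludes step ≤ 0, outside the puzzle's natural domain of a positive step size:
-- there A loops forever (step = 0 with positive goal) or walks downward and returns a
-- negative 'bag size' (step < 0) / 0 (step = 0 with goal ≤ 0).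
def Pre_kleinste_zak (goal : Int) (step : Int) : Prop := 1 ≤ step
instance (goal : Int) (step : Int) : Decidable (Pre_kleinste_zak goal step) := by
  unfold Pre_kleinste_zak; infer_instance

def pvWitness_kleinste_zak : Int × Int := (12, 1)

def Spec_kleinste_zak (goal : Int) (step : Int) (out : Int) : Prop := out = kleinste_zak_alt goal step
instance (goal : Int) (step : Int) (out : Int) : Decidable (Spec_kleinste_zak goal step out) := by
  unfold Spec_kleinste_zak; infer_instance

-- ===== CLAIM (what is proved, stated in full; the proofs are below) =====
def Claim_equal_kleinste_zak : Prop := ∀ (goal : Int) (step : Int), Dom_kleinste_zak goal step → Pre_kleinste_zak goal step → Spec_kleinste_zak goal step (kleinste_zak goal step)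

-- ===== LEMMAS AND PROOFS =====

-- closed form of the packages-in-bag fold
lemma aantal_fold {α : Type} (l : List α) (p pc : Int) :
    l.foldl (fun (st : Int × Int) (_ : α) => (st.1 + st.2, st.2 + 2)) (p, pc)
      = (p + l.length * pc + l.length * (l.length - 1), pc + 2 * l.length) := by
  induction l generalizing p pc with
  | nil => simp
  | cons a t ih =>
    simp only [List.foldl_cons, ih, List.length_cons, Prod.mk.injEq]
    constructor <;> push_cast <;> ring

lemma aantal_eq (s : Int) (hs : 0 ≤ s) :
    aantal_pakjes_in_zak s = 7 * s * s - 2 * s := by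
  unfold aantal_pakjes_in_zak
  rw [PySem.List.pyRange_one, List.foldl_map, aantal_fold]
  have h : (((s - 0).toNat : Int)) = s := by omega
  simp only [List.length_range, h]
  ring

-- the target function: packages in a bag of side s (for s ≥ 0)
lemma pvF_mono (a b : Int) (ha : 1 ≤ a) (hab : a ≤ b) :
    7 * a * a - 2 * a ≤ 7 * b * b - 2 * b := by nlinarith

lemma pvF_ge_self (a : Int) (ha : 1 ≤ a) : a ≤ 7 * a * a - 2 * a := by nlinarith

-- CHARACTERIZATION: r is the least s ≥ 1 with f(s) ≥ goal
def pvChar (goal r : Int) : Prop :=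
  1 ≤ r ∧ goal ≤ 7 * r * r - 2 * r ∧ (r = 1 ∨ 7 * (r-1) * (r-1) - 2 * (r-1) < goal)

lemma pvChar_unique (goal r1 r2 : Int) (h1 : pvChar goal r1) (h2 : pvChar goal r2) : r1 = r2 := by
  obtain ⟨ha1, hb1, hc1⟩ := h1
  obtain ⟨ha2, hb2, hc2⟩ := h2
  by_contra hne
  rcases lt_or_gt_of_ne hne with h | h
  · rcases hc2 with h2one | h2lt
    · omega
    · have : 7 * r1 * r1 - 2 * r1 ≤ 7 * (r2-1) * (r2-1) - 2 * (r2-1) :=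
        pvF_mono _ _ ha1 (by omega)
      omega
  · rcases hc1 with h1one | h1lt
    · omega
    · have : 7 * r2 * r2 - 2 * r2 ≤ 7 * (r1-1) * (r1-1) - 2 * (r1-1) :=
        pvF_mono _ _ ha2 (by omega)
      omega

-- A's guess loop: from a valid low with enough fuel, it returns (low', high') with
-- high' = low' + step just above the goal
lemma guess_spec (goal step : Int) (hstep : 1 ≤ step) :
    ∀ (fuel : Nat) (low : Int), 0 ≤ low →
      (aantal_pakjes_in_zak low < goal ∨ low = 0) →
      goal ≤ low + fuel →
      0 ≤ (kleinste_zak_guess goal step fuel low).1 ∧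
      (aantal_pakjes_in_zak (kleinste_zak_guess goal step fuel low).1 < goal ∨
        (kleinste_zak_guess goal step fuel low).1 = 0) ∧
      goal ≤ aantal_pakjes_in_zak (kleinste_zak_guess goal step fuel low).2 ∧
      (kleinste_zak_guess goal step fuel low).2 = (kleinste_zak_guess goal step fuel low).1 + step := by
  intro fuel
  induction fuel with
  | zero =>
    intro low hlow hdis hfuel
    simp only [kleinste_zak_guess]
    refine ⟨hlow, hdis, ?_, by trivial⟩
    simp only [Nat.cast_zero, add_zero] at hfuel
    have h0 : goal ≤ 0 := by
      rcases hdis with h | h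
      · rw [aantal_eq low hlow] at h
        by_cases hl1 : 1 ≤ low
        · have := pvF_ge_self low hl1; omega
        · have hl0 : low = 0 := by omega
          subst hl0; norm_num at h; omega
      · omega
    rw [aantal_eq (low + step) (by omega)]
    nlinarith
  | succ fuel ih =>
    intro low hlow hdis hfuel
    simp only [kleinste_zak_guess]
    by_cases hc : aantal_pakjes_in_zak (low + step) < goal
    · simp only [if_pos hc]
      exact ih (low + step) (by omega) (Or.inl hc) (by push_cast at hfuel ⊢; omega)
    · simp only [if_neg hc]
      exact ⟨hlow, hdis, by omega, by trivial⟩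

-- A's bisect loop: shrinks (low, high) to high = low + 1 and returns that high,
-- which satisfies the characterization
lemma bisect_spec (goal : Int) :
    ∀ (n : Nat) (low high : Int), (high - low).toNat ≤ n → 0 ≤ low → low < high →
      (aantal_pakjes_in_zak low < goal ∨ low = 0) →
      goal ≤ aantal_pakjes_in_zak high →
      pvChar goal (kleinste_zak_bisect goal low high) := by
  intro n
  induction n with
  | zero => intro low high hn _ hlh _ _; omega
  | succ n ih =>
    intro low high hn hlow hlh hdis hhigh
    rw [kleinste_zak_bisect]
    by_cases h : high > low + 1
    · simp only [dif_pos h]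
      have h2 : PySem.Int.floordiv (high - low) 2 = (high - low) / 2 :=
        PySem.Int.floordiv_eq_ediv_of_pos (by omega)
      rw [h2]
      set half := high - (high - low) / 2 with hhalf
      have hb1 : low < half := by omega
      have hb2 : half < high := by omega
      by_cases hc : aantal_pakjes_in_zak half < goal
      · simp only [if_pos hc]
        exact ih half high (by omega) (by omega) hb2 (Or.inl hc) hhigh
      · simp only [if_neg hc]
        exact ih low half (by omega) hlow hb1 hdis (by omega)
    · simp only [dif_neg h]
      have hh1 : high = low + 1 := by omega
      refine ⟨by omega, ?_, ?_⟩
      · rw [← aantal_eq high (by omega)]; exact hhigh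
      · rcases hdis with hl | hl
        · right
          rw [← aantal_eq (high - 1) (by omega)]
          rw [hh1]; simpa using hl
        · left; omega

-- A satisfies the characterization
lemma kleinste_zak_char (goal step : Int) (hstep : 1 ≤ step) :
    pvChar goal (kleinste_zak goal step) := by
  unfold kleinste_zak
  obtain ⟨h1, h2, h3, h4⟩ :=
    guess_spec goal step hstep (goal.toNat + 2) 0 le_rfl
      (Or.inr rfl) (by push_cast; omega)
  exact bisect_spec goal
    ((kleinste_zak_guess goal step (goal.toNat + 2) 0).2
      - (kleinste_zak_guess goal step (goal.toNat + 2) 0).1).toNat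
    _ _ le_rfl h1 (by omega) h2 h3

-- B-side: the Newton loop computes the floor square root
lemma isqrtLoop_eq_iter (n : Nat) : ∀ g : Nat, isqrtLoop n g = Nat.sqrt.iter n g := by
  intro g
  induction g using Nat.strong_induction_on with
  | _ g ih =>
    rw [isqrtLoop, Nat.sqrt.iter.eq_def]
    by_cases h : (g + n / g) / 2 < g
    · simp only [dif_pos h]
      exact ih _ h
    · simp only [dif_neg h]

lemma isqrt_bounds (n : Nat) (hn : 2 ≤ n) :
    isqrtLoop n (n / 2) * isqrtLoop n (n / 2) ≤ n ∧
    n < (isqrtLoop n (n / 2) + 1) * (isqrtLoop n (n / 2) + 1) := by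
  rw [isqrtLoop_eq_iter]
  refine ⟨Nat.sqrt.iter_sq_le _ _, Nat.sqrt.lt_iter_succ_sq _ _ ?_⟩
  have hq : 1 ≤ n / 2 := by omega
  have h2 : n ≤ 2 * (n / 2) + 1 := by omega
  nlinarith

-- B satisfies the characterization
lemma kleinste_zak_alt_char (goal step : Int) :
    pvChar goal (kleinste_zak_alt goal step) := by
  unfold kleinste_zak_alt
  by_cases hg : goal ≤ 5
  · simp only [if_pos hg]
    refine ⟨le_rfl, by norm_num; omega, Or.inl rfl⟩
  · simp only [if_neg hg]
    have hg6 : 6 ≤ goal := by omega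
    set nI : Int := 1 + 7 * goal with hnI
    have hn43 : (43 : Int) ≤ nI := by omega
    have hcast : ((nI.toNat : Int)) = nI := by omega
    obtain ⟨hlo, hhi⟩ := isqrt_bounds nI.toNat (by omega)
    set rN : Nat := isqrtLoop nI.toNat (nI.toNat / 2) with hrN
    have hrI : pyIsqrt nI = (rN : Int) := rfl
    set r : Int := (rN : Int) with hr
    have hlo' : r * r ≤ nI := by rw [← hcast, hr]; exact_mod_cast hlo
    have hhi' : nI < (r + 1) * (r + 1) := by rw [← hcast, hr]; exact_mod_cast hhi
    have hr0 : (0 : Int) ≤ r := by positivity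
    have hr6 : 6 ≤ r := by nlinarith [hr0, hhi', hn43]
    rw [hrI]
    have hfd : PySem.Int.floordiv (r + 7) 7 = (r + 7) / 7 :=
      PySem.Int.floordiv_eq_ediv_of_pos (by omega)
    rw [hfd]
    set s : Int := (r + 7) / 7 with hs
    have hsb : 7 * s ≤ r + 7 ∧ r + 1 ≤ 7 * s := by
      constructor <;> omega
    have hs1 : 1 ≤ s := by omega
    by_cases hc : 7 * s * s - 2 * s < goal
    · simp only [if_pos hc]
      refine ⟨by omega, ?_, Or.inr (by simpa using hc)⟩
      -- (7s+6)^2 ≥ (r+1)^2 > nI  ⇒  f(s+1) ≥ goal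
      nlinarith [sq_nonneg (7 * s + 6 - (r + 1))]
    · simp only [if_neg hc]
      refine ⟨hs1, by omega, ?_⟩
      rcases eq_or_lt_of_le hs1 with h1 | h2
      · exact Or.inl h1.symm
      · right
        -- s ≥ 2: (7s-8)^2 ≤ (r-1)^2 ≤ nI - 11  ⇒  f(s-1) < goal
        nlinarith [sq_nonneg (r - 1 - (7 * s - 8)), sq_nonneg (r - 6)]

-- ===== VERDICT (by name: the statement is the Claim_ definition above) =====
theorem kleinste_zak_spec : Claim_equal_kleinste_zak := by
  intro goal step _hdom hpre
  unfold Spec_kleinste_zak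
  exact pvChar_unique goal _ _ (kleinste_zak_char goal step hpre)
    (kleinste_zak_alt_char goal step)
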